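-- pv_equiv track=rewrite | github.com/leekh4232/study-coding-test | python/s.py | solution
-- ===== SOURCE A (Python) =====
-- def solution(nodes, target):
--     # 입력으로 받은 nodes 리스트를 직접 수정하기 위해 복사
--     arr = list(nodes)
--     n = len(arr)
--
--     # DFS 함수 정의: 특정 노드와 그 자손들을 '제거' 표시(-2)
--     def dfs(num, current_arr):
--         current_arr[num] = -2  # 현재 노드를 제거된 것으로 표시
--         for i in range(len(current_arr)):
--             # 현재 노드가 i번 노드의 부모라면 (즉, i번 노드가 현재 노드의 자식이라면)
--             if num == current_arr[i]:
--                 # 자식 노드에 대해 재귀적으로 dfs 호출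
--                 dfs(i, current_arr)
--
--     # 제거할 대상 노드(target)부터 DFS를 시작하여 모든 관련 노드를 제거 표시
--     dfs(target, arr)
--
--     count = 0
--     for i in range(n):
--         # 제거되지 않은 노드(-2가 아님)이면서
--         # 그 노드가 다른 어떤 노드의 부모도 아닌 경우 (리프 노드인 경우)
--         if arr[i] != -2 and i not in arr:
--             count += 1
--
--     return count
-- ===== SOURCE B (Python) =====
-- def solution(nodes, target):
--     arr = list(nodes)
--     n = len(arr)
--     children = {}
--     for i, p in enumerate(nodes):
--         children.setdefault(p, []).append(i)
--     arr[target] = -2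
--     stack = [target]
--     while stack:
--         v = stack.pop()
--         for c in children.get(v, []):
--             if arr[c] != -2:
--                 arr[c] = -2
--                 stack.append(c)
--     parents = set(arr)
--     count = 0
--     for i in range(n):
--         if arr[i] != -2 and i not in parents:
--             count += 1
--     return count
-- ===== Notes on version B (the rewrite author's own statement) =====
-- stated objective: faster
-- what changed: B builds a parent-value->children index once and removes the subtree with an explicit stack over that index, then counts leaves against a precomputed set of parent values, replacing A's recursive DFS that rescans the whole array at every visited node and A's O(n) 'i not in arr' list scan per counted node.
-- outside the precondition, e.g. on solution([-2, 0], -2): A returns 0, B returns 1; on solution([-1, 0, 1], -1): A returns 0, B returns 0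
import Mathlib
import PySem

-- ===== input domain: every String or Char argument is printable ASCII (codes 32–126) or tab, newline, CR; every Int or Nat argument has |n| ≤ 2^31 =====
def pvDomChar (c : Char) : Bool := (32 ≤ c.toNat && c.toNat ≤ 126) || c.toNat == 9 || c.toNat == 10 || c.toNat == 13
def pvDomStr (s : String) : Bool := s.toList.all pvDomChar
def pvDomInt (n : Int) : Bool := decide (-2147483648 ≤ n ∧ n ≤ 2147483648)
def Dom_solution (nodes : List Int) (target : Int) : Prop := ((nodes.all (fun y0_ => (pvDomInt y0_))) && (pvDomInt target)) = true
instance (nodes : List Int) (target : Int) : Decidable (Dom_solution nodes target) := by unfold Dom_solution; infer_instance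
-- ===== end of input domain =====

-- B replaces A's recursive whole-array-rescanning DFS and per-node 'i not in arr' list
-- scans by a children index, a breadth-first frontier loop and set membership (objective: faster).

-- ===== PORT A =====
-- A's dfs: mark arr[num] = -2, then scan ALL indices for children and recurse.
-- fuel bounds the recursion depth; each nested call marks a previously unmarked
-- index, so depth ≤ len(arr) + 1 and the fuel used in `solution` is never exhausted.
def pvDfsA : Nat → Int → List Int → List Int
  | 0, _, arr => arr
  | f+1, num, arr =>
    let arr1 := PySem.List.pySetD arr num (-2)
    (List.range arr1.length).foldl
      (fun (a : List Int) (i : Nat) => if a[i]? = some num then pvDfsA f (i : Int) a else a) arr1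

def solution (nodes : List Int) (target : Int) : Int :=
  let arr := nodes
  let n := arr.length
  let arrF := pvDfsA (n+1) target arr
  (List.range n).foldl
    (fun (count : Int) (i : Nat) =>
      if arrF[i]?.getD 0 ≠ -2 ∧ ¬ ((i : Int) ∈ arrF) then count + 1 else count) 0

-- ===== PORT B =====
-- children index: for i, p in enumerate(nodes): children.setdefault(p, []).append(i)
def pvChildren (nodes : List Int) : PySem.Dict Int (List Int) :=
  (PySem.List.enumerate nodes).foldl
    (fun d ip => d.modify ip.2 [] (· ++ [ip.1])) PySem.Dict.empty

-- while stack: v = stack.pop(); for c in children.get(v, []): if arr[c] != -2: mark and push.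
-- fuel bounds the iterations: every pop either ends a branch or freshly marks the pushed
-- children, so len(nodes) + 1 iterations always suffice under Pre_.
def pvStackLoop (children : PySem.Dict Int (List Int)) :
    Nat → List Int → List Int → List Int
  | 0, arr, _ => arr
  | f+1, arr, stack =>
    match stack with
    | [] => arr
    | v :: rest =>
      let st := (children.getD v []).foldl
        (fun (st : List Int × List Int) c =>
          if PySem.List.pyGetD st.1 c 0 ≠ -2
          then (PySem.List.pySetD st.1 c (-2), c :: st.2) else st)
        (arr, rest)
      pvStackLoop children f st.1 st.2

def solution_alt (nodes : List Int) (target : Int) : Int :=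
  let arr := nodes
  let n := arr.length
  let children := pvChildren nodes
  let arr1 := PySem.List.pySetD arr target (-2)
  let arrF := pvStackLoop children (n+1) arr1 [target]
  let parents := PySem.Set.ofList arrF
  (List.range n).foldl
    (fun (count : Int) (i : Nat) =>
      if PySem.List.pyGetD arrF (i : Int) 0 ≠ -2 ∧ ¬ ((i : Int) ∈ parents)
      then count + 1 else count) 0

-- ===== PRECONDITION & SPEC =====
-- Pre_ restricts target to a valid non-negative node index 0 ≤ target < len(nodes),
-- the problem's domain: outside [-len, len) both A and B raise IndexError, and a
-- negative in-range target is a corner reached only through Python's negative-index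
-- wraparound, where at target = -2 A's child scan collides with its own in-band
-- 'removed' marker -2 and chases slots it marked itself — an accident of the marker
-- choice that no caller of this coding-test function would specify (B matches A on
-- the other negative targets anyway).
def Pre_solution (nodes : List Int) (target : Int) : Prop :=
  0 ≤ target ∧ target < nodes.length
instance (nodes : List Int) (target : Int) : Decidable (Pre_solution nodes target) := by
  unfold Pre_solution; infer_instance

def pvWitness_solution : List Int × Int := ([-1, 0, 0, 1], 1)

def Spec_solution (nodes : List Int) (target : Int) (out : Int) : Prop := out = solution_alt nodes target
instance (nodes : List Int) (target : Int) (out : Int) : Decidable (Spec_solution nodes target out) := by unfold Spec_solution; infer_instance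

-- ===== CLAIM (what is proved, stated in full; the proofs are below) =====
def Claim_equal_solution : Prop := ∀ (nodes : List Int) (target : Int), Dom_solution nodes target → Pre_solution nodes target → Spec_solution nodes target (solution nodes target)

-- ===== LEMMAS AND PROOFS =====

-- parent-step relation on indices: b is a child of a (nodes[b] == a)
def pvStepN (nodes : List Int) (a b : Nat) : Prop :=
  b < nodes.length ∧ nodes.getD b 0 = (a : Int)

def pvReach (nodes : List Int) (t : Nat) : Nat → Prop :=
  Relation.ReflTransGen (pvStepN nodes) t

-- the array A's dfs manipulates: nodes with the indices in S overwritten by -2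
def pvMask (nodes : List Int) (S : Finset ℕ) : List Int :=
  nodes.mapIdx (fun j v => if j ∈ S then -2 else v)

-- "every new element of S' is fully explored": an unmarked child's parent in S' is old
def pvC (nodes : List Int) (S S' : Finset ℕ) : Prop :=
  ∀ j, j < nodes.length → j ∉ S' → ∀ i ∈ S', nodes.getD j 0 = (i : Int) → i ∈ S

lemma pvMask_length (nodes : List Int) (S : Finset ℕ) :
    (pvMask nodes S).length = nodes.length := by
  simp [pvMask]

lemma pvMask_getElem? (nodes : List Int) (S : Finset ℕ) (j : ℕ) (hj : j < nodes.length) :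
    (pvMask nodes S)[j]? = some (if j ∈ S then -2 else nodes.getD j 0) := by
  have hj' : j < (pvMask nodes S).length := by rwa [pvMask_length]
  rw [List.getElem?_eq_getElem hj']
  congr 1
  simp [pvMask, List.getElem_mapIdx, List.getD_eq_getElem?_getD, List.getElem?_eq_getElem hj]

lemma pvMask_empty (nodes : List Int) : pvMask nodes (∅ : Finset ℕ) = nodes := by
  apply List.ext_getElem (by simp [pvMask_length])
  intro j h1 h2
  simp [pvMask, List.getElem_mapIdx]

lemma pvMask_set (nodes : List Int) (S : Finset ℕ) (k : ℕ) (_hk : k < nodes.length) :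
    (pvMask nodes S).set k (-2) = pvMask nodes (insert k S) := by
  apply List.ext_getElem (by simp [pvMask_length])
  intro j h1 h2
  have hj : j < nodes.length := by simpa [pvMask_length] using h2
  rw [List.getElem_set]
  by_cases hjk : k = j
  · subst hjk
    simp [pvMask, List.getElem_mapIdx]
  · simp only [hjk, if_false]
    have hne : j ≠ k := fun h => hjk h.symm
    simp [pvMask, List.getElem_mapIdx, Finset.mem_insert, hne]

lemma pvC_comp (nodes : List Int) (S T T' : Finset ℕ)
    (h1 : pvC nodes S T) (h2 : pvC nodes T T') (hTT : T ⊆ T') :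
    pvC nodes S T' := by
  intro j hj hjT' i hi hpar
  have hiT : i ∈ T := h2 j hj hjT' i hi hpar
  exact h1 j hj (fun hc => hjT' (hTT hc)) i hiT hpar

lemma pvReach_trans_step (nodes : List Int) (num i : ℕ)
    (hstep : pvStepN nodes num i) {x : ℕ} (h : pvReach nodes i x) :
    pvReach nodes num x :=
  Relation.ReflTransGen.trans (Relation.ReflTransGen.single hstep) h

-- the inner scan of A's dfs, given the behaviour of dfs at the smaller fuel
lemma pvFold_spec (nodes : List Int) (f : Nat) (num : Nat) (S : Finset ℕ)
    (hnumS : num ∉ S)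
    (hScard : nodes.length + 1 ≤ (f+1) + S.card)
    (ihdfs : ∀ (m : Nat) (T : Finset ℕ), m < nodes.length → m ∉ T →
        (∀ j ∈ T, j < nodes.length) → nodes.length + 1 ≤ f + T.card →
        ∃ T', pvDfsA f (m : Int) (pvMask nodes T) = pvMask nodes T' ∧
          insert m T ⊆ T' ∧ (∀ j ∈ T', j < nodes.length) ∧
          (∀ j ∈ T', j ∈ T ∨ pvReach nodes m j) ∧ pvC nodes T T') :
    ∀ (l : List Nat) (T : Finset ℕ),
      (∀ i ∈ l, i < nodes.length) →
      insert num S ⊆ T → (∀ j ∈ T, j < nodes.length) →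
      ∃ T', l.foldl (fun (a : List Int) (i : Nat) =>
                if a[i]? = some ((num : ℕ) : Int) then pvDfsA f (i : Int) a else a)
              (pvMask nodes T) = pvMask nodes T' ∧
        T ⊆ T' ∧ (∀ j ∈ T', j < nodes.length) ∧
        (∀ j ∈ T', j ∈ T ∨ pvReach nodes num j) ∧
        pvC nodes T T' ∧
        (∀ p ∈ l, nodes.getD p 0 = (num : Int) → p ∈ T') := by
  intro l
  induction l with
  | nil =>
    intro T _hl hTsub hTb
    exact ⟨T, rfl, Finset.Subset.refl T, hTb, fun j hj => Or.inl hj,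
      fun j _ _ i hi _ => hi, by simp⟩
  | cons i l ih =>
    intro T hl hTsub hTb
    rw [List.foldl_cons]
    have hi : i < nodes.length := hl i List.mem_cons_self
    have hcardT : nodes.length + 1 ≤ f + T.card := by
      have h1 : (insert num S).card ≤ T.card := Finset.card_le_card hTsub
      rw [Finset.card_insert_of_notMem hnumS] at h1
      omega
    have hget : (pvMask nodes T)[i]? = some (if i ∈ T then -2 else nodes.getD i 0) :=
      pvMask_getElem? nodes T i hi
    by_cases hcond : (pvMask nodes T)[i]? = some ((num : ℕ) : Int)
    · -- child found: recurse into dfs at i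
      have hiT : i ∉ T ∧ nodes.getD i 0 = ((num : ℕ) : Int) := by
        rw [hget] at hcond
        have := Option.some.inj hcond
        by_cases hmem : i ∈ T
        · rw [if_pos hmem] at this; omega
        · rw [if_neg hmem] at this; exact ⟨hmem, this⟩
      obtain ⟨T₁, heq1, hsub1, hb1, hsound1, hC1⟩ :=
        ihdfs i T hi hiT.1 hTb hcardT
      rw [if_pos hcond, heq1]
      have hTsub1 : insert num S ⊆ T₁ :=
        Finset.Subset.trans hTsub (Finset.Subset.trans (Finset.subset_insert i T) hsub1)
      obtain ⟨T', heq', hsub', hb', hsound', hC', hscan'⟩ :=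
        ih T₁ (fun p hp => hl p (List.mem_cons_of_mem _ hp)) hTsub1 hb1
      have hTT1 : T ⊆ T₁ := Finset.Subset.trans (Finset.subset_insert i T) hsub1
      have hstep : pvStepN nodes num i := ⟨hi, hiT.2⟩
      refine ⟨T', heq', Finset.Subset.trans hTT1 hsub', hb', ?_, ?_, ?_⟩
      · intro j hj
        rcases hsound' j hj with hj1 | hr
        · rcases hsound1 j hj1 with hj2 | hr
          · exact Or.inl hj2
          · exact Or.inr (pvReach_trans_step nodes num i hstep hr)
        · exact Or.inr hr
      · exact pvC_comp nodes T T₁ T' hC1 hC' hsub'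
      · intro p hp hpar
        rcases List.mem_cons.mp hp with rfl | hp
        · exact hsub' (hsub1 (Finset.mem_insert_self p T))
        · exact hscan' p hp hpar
    · -- no child here
      rw [if_neg hcond]
      obtain ⟨T', heq', hsub', hb', hsound', hC', hscan'⟩ :=
        ih T (fun p hp => hl p (List.mem_cons_of_mem _ hp)) hTsub hTb
      refine ⟨T', heq', hsub', hb', hsound', hC', ?_⟩
      intro p hp hpar
      rcases List.mem_cons.mp hp with rfl | hp
      · -- the scan did not fire, so p must already be marked
        have hpT : p ∈ T := by
          by_contra hpT
          exact hcond (by rw [hget, if_neg hpT, hpar])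
        exact hsub' hpT
      · exact hscan' p hp hpar

-- A's dfs computes pvMask of the pvReach-closure added to S
lemma pvDfs_spec (nodes : List Int) :
    ∀ (fuel : Nat) (num : Nat) (S : Finset ℕ), num < nodes.length → num ∉ S →
      (∀ j ∈ S, j < nodes.length) → nodes.length + 1 ≤ fuel + S.card →
      ∃ S', pvDfsA fuel (num : Int) (pvMask nodes S) = pvMask nodes S' ∧
        insert num S ⊆ S' ∧ (∀ j ∈ S', j < nodes.length) ∧
        (∀ j ∈ S', j ∈ S ∨ pvReach nodes num j) ∧ pvC nodes S S' := by
  intro fuel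
  induction fuel with
  | zero =>
    intro num S hnum hnumS hS hfuel
    exfalso
    have hsub : insert num S ⊆ Finset.range nodes.length := by
      intro j hj
      rcases Finset.mem_insert.mp hj with rfl | hj
      · exact Finset.mem_range.mpr hnum
      · exact Finset.mem_range.mpr (hS j hj)
    have hc := Finset.card_le_card hsub
    rw [Finset.card_insert_of_notMem hnumS, Finset.card_range] at hc
    omega
  | succ f ihf =>
    intro num S hnum hnumS hS hfuel
    have harr1 : PySem.List.pySetD (pvMask nodes S) ((num : ℕ) : Int) (-2)
        = pvMask nodes (insert num S) := by
      rw [PySem.List.pySetD_natCast]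
      exact pvMask_set nodes S num hnum
    have hTb : ∀ j ∈ insert num S, j < nodes.length := by
      intro j hj
      rcases Finset.mem_insert.mp hj with rfl | hj
      · exact hnum
      · exact hS j hj
    obtain ⟨T', heq', hsub', hb', hsound', hC', hscan'⟩ :=
      pvFold_spec nodes f num S hnumS hfuel ihf (List.range nodes.length) (insert num S)
        (fun p hp => List.mem_range.mp hp) (Finset.Subset.refl _) hTb
    refine ⟨T', ?_, Finset.Subset.trans (Finset.Subset.refl _) hsub', hb', ?_, ?_⟩
    · simp only [pvDfsA, harr1, pvMask_length]
      exact heq'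
    · intro j hj
      rcases hsound' j hj with hj1 | hr
      · rcases Finset.mem_insert.mp hj1 with rfl | hj2
        · exact Or.inr Relation.ReflTransGen.refl
        · exact Or.inl hj2
      · exact Or.inr hr
    · intro j hj hjT' i hi hpar
      have hiT : i ∈ insert num S := hC' j hj hjT' i hi hpar
      rcases Finset.mem_insert.mp hiT with rfl | hiS
      · exfalso
        exact hjT' (hscan' j (List.mem_range.mpr hj) hpar)
      · exact hiS

-- top-level characterisation of A's marking phase
lemma pvA_char (nodes : List Int) (target : Int)
    (h0 : 0 ≤ target) (h1 : target < nodes.length) :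
    ∃ S' : Finset ℕ, pvDfsA (nodes.length + 1) target nodes = pvMask nodes S' ∧
      (∀ j ∈ S', j < nodes.length) ∧
      (∀ j, j ∈ S' ↔ pvReach nodes target.toNat j) := by
  have ht : target.toNat < nodes.length := by omega
  obtain ⟨S', heq, hsub, hb, hsound, hC⟩ :=
    pvDfs_spec nodes (nodes.length + 1) target.toNat ∅ ht (Finset.notMem_empty _)
      (by simp) (by simp)
  refine ⟨S', ?_, hb, ?_⟩
  · have hcast : ((target.toNat : ℕ) : Int) = target := Int.toNat_of_nonneg h0
    calc pvDfsA (nodes.length + 1) target nodes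
        = pvDfsA (nodes.length + 1) ((target.toNat : ℕ) : Int) (pvMask nodes ∅) := by
          rw [hcast, pvMask_empty]
      _ = pvMask nodes S' := by rw [← pvMask_length nodes (∅ : Finset ℕ), ← pvMask_empty nodes] at heq ⊢; exact heq
  · intro j
    constructor
    · intro hj
      rcases hsound j hj with hj1 | hr
      · exact absurd hj1 (Finset.notMem_empty _)
      · exact hr
    · intro hr
      induction hr with
      | refl => exact hsub (Finset.mem_insert_self _ _)
      | tail hab hstep ih =>
        rename_i b c
        by_contra hc
        exact absurd (hC c hstep.1 hc b ih hstep.2) (Finset.notMem_empty _)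

-- ===== B-side lemmas =====

lemma pvChildren_fold_getD (l : List (Int × Int)) :
    ∀ (d : PySem.Dict Int (List Int)) (p : Int),
      (l.foldl (fun d ip => d.modify ip.2 [] (· ++ [ip.1])) d).getD p []
        = d.getD p [] ++ (l.filter (fun ip => ip.2 = p)).map (·.1) := by
  induction l with
  | nil => intro d p; simp
  | cons ip l ih =>
    intro d p
    rw [List.foldl_cons, ih]
    by_cases h : ip.2 = p
    · subst h
      rw [PySem.Dict.getD_modify]
      simp [List.append_assoc]
    · rw [PySem.Dict.getD_modify]
      simp [h, Ne.symm h]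

lemma pvChildren_mem (nodes : List Int) (p x : Int) :
    x ∈ (pvChildren nodes).getD p [] ↔
      ∃ k : ℕ, k < nodes.length ∧ x = (k : Int) ∧ nodes.getD k 0 = p := by
  unfold pvChildren
  rw [pvChildren_fold_getD]
  simp only [PySem.Dict.getD_empty, List.nil_append, List.mem_map, List.mem_filter]
  constructor
  · rintro ⟨ip, ⟨hmem, hp⟩, hx⟩
    rw [PySem.List.mem_enumerate_iff] at hmem
    obtain ⟨k, hk, rfl⟩ := hmem
    refine ⟨k, hk, ?_, ?_⟩
    · simpa using hx.symm
    · have : nodes.getD k 0 = nodes[k] := by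
        rw [List.getD_eq_getElem?_getD, List.getElem?_eq_getElem hk]; rfl
      rw [this]
      simpa using of_decide_eq_true hp
  · rintro ⟨k, hk, rfl, hnk⟩
    refine ⟨((k : Int), nodes[k]), ⟨?_, ?_⟩, rfl⟩
    · rw [PySem.List.mem_enumerate_iff]
      exact ⟨k, hk, by simp⟩
    · simp only [decide_eq_true_eq]
      rw [List.getD_eq_getElem?_getD, List.getElem?_eq_getElem hk] at hnk
      exact hnk


-- one pass over the children of node m: fresh ones get marked and pushed
lemma pvPush_spec (nodes : List Int) (m : ℕ) :
    ∀ (cs : List Int) (M : Finset ℕ) (rest : List Int),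
      (∀ c ∈ cs, ∃ k : ℕ, k < nodes.length ∧ c = (k : Int) ∧ nodes.getD k 0 = (m : Int)) →
      ∃ fr : List ℕ,
        cs.foldl (fun (st : List Int × List Int) c =>
            if PySem.List.pyGetD st.1 c 0 ≠ -2
            then (PySem.List.pySetD st.1 c (-2), c :: st.2) else st)
          (pvMask nodes M, rest)
        = (pvMask nodes (M ∪ fr.toFinset), fr.map (fun (k : ℕ) => (k : Int)) ++ rest) ∧
        fr.Nodup ∧
        (∀ k ∈ fr, k < nodes.length ∧ k ∉ M ∧ nodes.getD k 0 = (m : Int)) ∧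
        (∀ c ∈ cs, ∃ k : ℕ, c = (k : Int) ∧ k ∈ M ∪ fr.toFinset) := by
  intro cs
  induction cs with
  | nil =>
    intro M rest _
    exact ⟨[], by simp, by simp, by simp, by simp⟩
  | cons c cs ih =>
    intro M rest hcs
    obtain ⟨k, hk, rfl, hpar⟩ := hcs c List.mem_cons_self
    have hget : PySem.List.pyGetD (pvMask nodes M) ((k : ℕ) : Int) 0
        = if k ∈ M then -2 else nodes.getD k 0 := by
      rw [PySem.List.pyGetD_natCast, List.getD_eq_getElem?_getD, pvMask_getElem? nodes M k hk]
      rfl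
    by_cases hkM : k ∈ M
    · -- already marked: skip
      obtain ⟨fr, heq, hnd, hfr, hcov⟩ := ih M rest (fun c hc => hcs c (List.mem_cons_of_mem _ hc))
      refine ⟨fr, ?_, hnd, hfr, ?_⟩
      · rw [List.foldl_cons, if_neg (by rw [hget, if_pos hkM]; simp)]
        exact heq
      · intro c hc
        rcases List.mem_cons.mp hc with rfl | hc
        · exact ⟨k, rfl, Finset.mem_union_left _ hkM⟩
        · exact hcov c hc
    · -- fresh: mark and push
      have hset : PySem.List.pySetD (pvMask nodes M) ((k : ℕ) : Int) (-2)
          = pvMask nodes (insert k M) := by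
        rw [PySem.List.pySetD_natCast]
        exact pvMask_set nodes M k hk
      obtain ⟨fr, heq, hnd, hfr, hcov⟩ :=
        ih (insert k M) ((k : Int) :: rest) (fun c hc => hcs c (List.mem_cons_of_mem _ hc))
      have hkfr : k ∉ fr := fun hc => (hfr k hc).2.1 (Finset.mem_insert_self k M)
      have hsets : insert k M ∪ fr.toFinset = M ∪ (fr ++ [k]).toFinset := by
        apply Finset.ext
        intro j
        simp only [Finset.mem_union, Finset.mem_insert, List.mem_toFinset, List.mem_append,
          List.mem_singleton]
        tauto
      have hlist : (fr.map (fun (k : ℕ) => (k : Int))) ++ ((k : Int) :: rest)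
          = ((fr ++ [k]).map (fun (j : ℕ) => (j : Int))) ++ rest := by
        rw [List.map_append, List.append_assoc]
        rfl
      refine ⟨fr ++ [k], ?_, ?_, ?_, ?_⟩
      · rw [List.foldl_cons, if_pos (by rw [hget, if_neg hkM, hpar]; omega), hset, heq,
          hsets, hlist]
      · rw [List.nodup_append]
        refine ⟨hnd, List.nodup_singleton _, ?_⟩
        intro a ha b hb
        rcases List.mem_singleton.mp hb with rfl
        exact fun h => hkfr (h ▸ ha)
      · intro j hj
        rcases List.mem_append.mp hj with hj | hj
        · obtain ⟨h1, h2, h3⟩ := hfr j hj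
          exact ⟨h1, fun hc => h2 (Finset.mem_insert_of_mem hc), h3⟩
        · simp only [List.mem_singleton] at hj
          subst hj
          exact ⟨hk, hkM, hpar⟩
      · intro c hc
        rcases List.mem_cons.mp hc with hch | hc
        · exact ⟨k, hch, by simp⟩
        · obtain ⟨j, hje, hj⟩ := hcov c hc
          refine ⟨j, hje, ?_⟩
          rcases Finset.mem_union.mp hj with hj | hj
          · rcases Finset.mem_insert.mp hj with rfl | hj
            · simp
            · exact Finset.mem_union_left _ hj
          · simp only [Finset.mem_union, List.mem_toFinset, List.mem_append,
              List.mem_singleton]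
            exact Or.inr (Or.inl (List.mem_toFinset.mp hj))

-- B's stack loop computes the pvMask of the pvReach-closure
lemma pvStack_spec (nodes : List Int) (t' : ℕ) (_ht : t' < nodes.length) :
    ∀ (fuel : Nat) (M : Finset ℕ) (stack : List Int),
      (∀ m ∈ M, m < nodes.length) →
      t' ∈ M →
      (∀ x ∈ stack, ∃ m ∈ M, x = (m : Int)) →
      (∀ m ∈ M, pvReach nodes t' m) →
      (∀ m ∈ M, ((m : Int) ∈ stack) ∨ ∀ j, j < nodes.length → nodes.getD j 0 = (m : Int) → j ∈ M) →
      stack.length + nodes.length + 1 ≤ fuel + M.card →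
      ∃ M', pvStackLoop (pvChildren nodes) fuel (pvMask nodes M) stack = pvMask nodes M' ∧
        (∀ j, j ∈ M' ↔ pvReach nodes t' j) := by
  intro fuel
  induction fuel with
  | zero =>
    intro M stack hMb _ _ _ _ hfuel
    exfalso
    have hsub : M ⊆ Finset.range nodes.length := fun j hj => Finset.mem_range.mpr (hMb j hj)
    have := Finset.card_le_card hsub
    rw [Finset.card_range] at this
    omega
  | succ f ihf =>
    intro M stack hMb htM hstk hsound hpend hfuel
    match stack, hstk, hpend, hfuel with
    | [], hstk, hpend, hfuel =>
      refine ⟨M, rfl, fun j => ⟨hsound j, ?_⟩⟩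
      intro hr
      induction hr with
      | refl => exact htM
      | tail hab hstep ih =>
        rename_i a c
        exact ((hpend a ih).resolve_left (by simp)) c hstep.1 hstep.2
    | v :: rest, hstk, hpend, hfuel =>
      obtain ⟨m, hmM, rfl⟩ := hstk v List.mem_cons_self
      have hcs : ∀ c ∈ (pvChildren nodes).getD ((m : ℕ) : Int) [],
          ∃ k : ℕ, k < nodes.length ∧ c = (k : Int) ∧ nodes.getD k 0 = (m : Int) :=
        fun c hc => (pvChildren_mem nodes _ c).mp hc
      obtain ⟨fr, heq, hnd, hfr, hcov⟩ :=
        pvPush_spec nodes m ((pvChildren nodes).getD ((m : ℕ) : Int) []) M rest hcs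
      have hdisj : Disjoint M fr.toFinset := by
        rw [Finset.disjoint_right]
        intro k hk
        exact (hfr k (List.mem_toFinset.mp hk)).2.1
      have hcard : (M ∪ fr.toFinset).card = M.card + fr.length := by
        rw [Finset.card_union_of_disjoint hdisj, List.toFinset_card_of_nodup hnd]
      show ∃ M', pvStackLoop (pvChildren nodes) f _ _ = _ ∧ _
      rw [heq]
      apply ihf (M ∪ fr.toFinset) (fr.map (fun (k : ℕ) => (k : Int)) ++ rest)
      · intro j hj
        rcases Finset.mem_union.mp hj with hj | hj
        · exact hMb j hj
        · exact (hfr j (List.mem_toFinset.mp hj)).1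
      · exact Finset.mem_union_left _ htM
      · intro x hx
        rcases List.mem_append.mp hx with hx | hx
        · obtain ⟨k, hk, rfl⟩ := List.mem_map.mp hx
          exact ⟨k, Finset.mem_union_right _ (List.mem_toFinset.mpr hk), rfl⟩
        · obtain ⟨m', hm', rfl⟩ := hstk _ (List.mem_cons_of_mem _ hx)
          exact ⟨m', Finset.mem_union_left _ hm', rfl⟩
      · intro j hj
        rcases Finset.mem_union.mp hj with hj | hj
        · exact hsound j hj
        · obtain ⟨hjn, _, hjp⟩ := hfr j (List.mem_toFinset.mp hj)
          exact Relation.ReflTransGen.tail (hsound m hmM) ⟨hjn, hjp⟩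
      · intro m' hm'
        rcases Finset.mem_union.mp hm' with hm'M | hm'F
        · rcases hpend m' hm'M with hst | hcl
          · rcases List.mem_cons.mp hst with hveq | hrest
            · -- m' is the popped node: its children are now all marked
              have hmm : m' = m := by exact_mod_cast hveq
              subst hmm
              right
              intro j hjn hjp
              have : ((j : ℕ) : Int) ∈ (pvChildren nodes).getD ((m' : ℕ) : Int) [] :=
                (pvChildren_mem nodes _ _).mpr ⟨j, hjn, rfl, hjp⟩
              obtain ⟨k, hkeq, hk⟩ := hcov _ this
              have : j = k := by exact_mod_cast hkeq
              exact this ▸ hk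
            · exact Or.inl (List.mem_append_right _ hrest)
          · exact Or.inr (fun j hjn hjp => Finset.mem_union_left _ (hcl j hjn hjp))
        · have hmfr : m' ∈ fr := List.mem_toFinset.mp hm'F
          exact Or.inl (List.mem_append_left _ (List.mem_map.mpr ⟨m', hmfr, rfl⟩))
      · rw [List.length_append, List.length_map, hcard]
        simp only [List.length_cons] at hfuel
        omega

-- top-level characterisation of B's marking phase
lemma pvB_char (nodes : List Int) (target : Int)
    (h0 : 0 ≤ target) (h1 : target < nodes.length) :
    ∃ S' : Finset ℕ,
      pvStackLoop (pvChildren nodes) (nodes.length + 1)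
          (PySem.List.pySetD nodes target (-2)) [target] = pvMask nodes S' ∧
      (∀ j, j ∈ S' ↔ pvReach nodes target.toNat j) := by
  have ht : target.toNat < nodes.length := by omega
  have hcast : ((target.toNat : ℕ) : Int) = target := Int.toNat_of_nonneg h0
  have hinit : PySem.List.pySetD nodes target (-2) = pvMask nodes {target.toNat} := by
    rw [← hcast, PySem.List.pySetD_natCast]
    have h2 := pvMask_set nodes ∅ target.toNat ht
    rw [pvMask_empty nodes, Finset.insert_empty] at h2
    exact h2
  rw [hinit, ← hcast]
  exact pvStack_spec nodes target.toNat ht (nodes.length + 1) {target.toNat}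
    [((target.toNat : ℕ) : Int)]
    (by intro m hm; rw [Finset.mem_singleton] at hm; omega)
    (Finset.mem_singleton_self _)
    (by intro x hx; rw [List.mem_singleton] at hx; exact ⟨target.toNat, Finset.mem_singleton_self _, hx⟩)
    (by intro m hm; rw [Finset.mem_singleton] at hm; subst hm; exact Relation.ReflTransGen.refl)
    (by intro m hm; rw [Finset.mem_singleton] at hm; subst hm; exact Or.inl List.mem_cons_self)
    (by have hsub : ({target.toNat} : Finset ℕ).card = 1 := Finset.card_singleton _
        simp only [List.length_cons, List.length_nil, hsub]
        omega)

-- ===== VERDICT (by name: the statement is the Claim_ definition above) =====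
theorem solution_spec : Claim_equal_solution := by
  unfold Claim_equal_solution
  intro nodes target _hdom hpre
  obtain ⟨h0, h1⟩ := hpre
  unfold Spec_solution solution solution_alt
  simp only []
  obtain ⟨SA, heqA, _hbA, hiffA⟩ := pvA_char nodes target h0 h1
  obtain ⟨SB, heqB, hiffB⟩ := pvB_char nodes target h0 h1
  have hS : SA = SB := Finset.ext (fun j => by rw [hiffA j, hiffB j])
  rw [heqA, heqB, ← hS]
  apply PySem.List.foldl_congr_mem
  intro count i hi
  have hin : i < nodes.length := List.mem_range.mp hi
  have hg1 : (pvMask nodes SA)[i]?.getD 0 = (if i ∈ SA then -2 else nodes.getD i 0) := by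
    rw [pvMask_getElem? nodes SA i hin]
    rfl
  have hg2 : PySem.List.pyGetD (pvMask nodes SA) ((i : ℕ) : Int) 0
      = (if i ∈ SA then -2 else nodes.getD i 0) := by
    rw [PySem.List.pyGetD_natCast, List.getD_eq_getElem?_getD, pvMask_getElem? nodes SA i hin]
    rfl
  refine if_congr (and_congr ?_ (not_congr ?_)) rfl rfl
  · rw [hg1, hg2]
  · exact (PySem.Set.mem_ofList _ _).symm
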